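-- pv_equiv track=rewrite | github.com/Aasthaengg/IBMdataset | Python_codes/p02270/s654251003.py | check
-- ===== SOURCE A (Python) =====
-- def check(P, k, n, T):
--     res = 0
--     for _ in range(k):
--         s = 0
--         while s + T[res] <= P:
--             s += T[res]
--             res += 1
--             if res == n:
--                 return n
--     return res
-- ===== SOURCE B (Python) =====
-- def check(P, k, n, T):
--     if k <= 0:
--         return 0
--     s = 0
--     used = 1
--     for i in range(n):
--         t = T[i]
--         if s + t <= P:
--             s += t
--         else:
--             used += 1
--             if used > k:
--                 return i
--             if t > P:
--                 return i
--             s = t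
--     return n
-- ===== Notes on version B (the rewrite author's own statement) =====
-- stated objective: simpler
-- what changed: Replaced A's truck-loop with a nested item-filling while by a single forward pass over item indices that maintains the current load and the number of trucks used, returning the stuck index as soon as trucks run out or an item exceeds P.
-- outside the precondition, e.g. on check(5, 7, -1, [9, 0, 3]): A returns 0, B returns -1; on check(1, 1, 5, [10]): A returns 0, B returns 0; on check(10, 1, 5, [3]): A raises IndexError, B raises IndexError
import Mathlib
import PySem

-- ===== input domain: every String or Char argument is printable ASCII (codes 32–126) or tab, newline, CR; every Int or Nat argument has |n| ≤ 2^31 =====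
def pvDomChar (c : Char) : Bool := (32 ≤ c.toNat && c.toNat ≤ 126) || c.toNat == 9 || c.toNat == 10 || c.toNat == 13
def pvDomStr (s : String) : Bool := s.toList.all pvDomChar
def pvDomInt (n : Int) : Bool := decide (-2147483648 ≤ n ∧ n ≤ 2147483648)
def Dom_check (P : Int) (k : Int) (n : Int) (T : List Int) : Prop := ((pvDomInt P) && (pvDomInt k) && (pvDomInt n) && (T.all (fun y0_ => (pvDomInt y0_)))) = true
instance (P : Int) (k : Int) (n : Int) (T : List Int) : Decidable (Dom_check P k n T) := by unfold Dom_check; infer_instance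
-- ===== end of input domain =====

-- B changes the decomposition: one forward pass over items maintaining load and truck count,
-- instead of A's loop over trucks with an inner item-filling while loop (objective: simpler).

-- ===== PORT A =====
-- inner while loop of A: returns (res, early?) where early? means 'return n' fired.
-- fuel is an artifact for totality; inside Pre_ it is never exhausted.
def checkInnerA (P n : Int) (T : List Int) : Nat → Int → Int → Int × Bool
  | 0, _, res => (res, false)
  | fuel + 1, s, res =>
    match PySem.List.pyGet? T res with
    | none => (res, false)   -- Python raises IndexError here; outside Pre_
    | some t =>
      if s + t ≤ P then
        if res + 1 = n then (res + 1, true)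
        else checkInnerA P n T fuel (s + t) (res + 1)
      else (res, false)

-- outer 'for _ in range(k)' loop of A (inner fuel T.length + 1 bounds the while: res increments each step and indexing fails at res = len)
def checkOuterA (P n : Int) (T : List Int) : Nat → Int → Int
  | 0, res => res
  | j + 1, res =>
    let pr := checkInnerA P n T (T.length + 1) 0 res
    if pr.2 then pr.1 else checkOuterA P n T j pr.1

def check (P : Int) (k : Int) (n : Int) (T : List Int) : Int :=
  checkOuterA P n T k.toNat 0

-- ===== PORT B =====
-- single pass of B over item indices i; cnt = number of loop iterations remaining (n - i)
def checkGoB (P k n : Int) (T : List Int) : Nat → Int → Int → Int → Int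
  | 0, _, _, _ => n
  | cnt + 1, s, used, i =>
    match PySem.List.pyGet? T i with
    | none => 0   -- Python raises IndexError here; outside Pre_
    | some t =>
      if s + t ≤ P then checkGoB P k n T cnt (s + t) used (i + 1)
      else if used + 1 > k then i
      else if t > P then i
      else checkGoB P k n T cnt t (used + 1) (i + 1)

def check_alt (P : Int) (k : Int) (n : Int) (T : List Int) : Int :=
  if k ≤ 0 then 0 else checkGoB P k n T n.toNat 0 1 0

-- ===== PRECONDITION & SPEC =====
-- Pre_ keeps k ≤ 0 (A returns 0 without reading T) and the intended shape 1 ≤ n ≤ len(T);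
-- it excludes malformed item counts (n < 1 or n > len(T) with k > 0), on which A raises
-- IndexError for some item values and returns an accidental index for others.
def Pre_check (P : Int) (k : Int) (n : Int) (T : List Int) : Prop :=
  k ≤ 0 ∨ (1 ≤ n ∧ n ≤ T.length)
instance (P : Int) (k : Int) (n : Int) (T : List Int) : Decidable (Pre_check P k n T) := by
  unfold Pre_check; infer_instance

def pvWitness_check : Int × Int × Int × List Int := (10, 2, 4, [3, 4, 5, 2])

def Spec_check (P : Int) (k : Int) (n : Int) (T : List Int) (out : Int) : Prop := out = check_alt P k n T
instance (P : Int) (k : Int) (n : Int) (T : List Int) (out : Int) : Decidable (Spec_check P k n T out) := by unfold Spec_check; infer_instance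

-- ===== CLAIM (what is proved, stated in full; the proofs are below) =====
def Claim_equal_check : Prop := ∀ (P : Int) (k : Int) (n : Int) (T : List Int), Dom_check P k n T → Pre_check P k n T → Spec_check P k n T (check P k n T)

-- ===== LEMMAS AND PROOFS =====

-- a truck facing an item that alone exceeds P loads nothing; all remaining trucks burn
lemma outer_burn (P n : Int) (T : List Int) (res t : Int)
    (ht : PySem.List.pyGet? T res = some t) (hP : ¬ t ≤ P) :
    ∀ j, checkOuterA P n T j res = res := by
  intro j
  induction j with
  | zero => rfl
  | succ j ih =>
    simp only [checkOuterA]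
    simp [checkInnerA, ht, hP, ih]

-- inner loop value does not depend on the fuel, as long as fuel ≥ n - res
lemma inner_fuel (P n : Int) (T : List Int) :
    ∀ (f1 f2 : Nat) (s res : Int), 0 ≤ res → res < n → n ≤ T.length →
      (n - res).toNat ≤ f1 → (n - res).toNat ≤ f2 →
      checkInnerA P n T f1 s res = checkInnerA P n T f2 s res := by
  intro f1
  induction f1 with
  | zero => intro f2 s res h0 hlt hlen h1 h2; omega
  | succ f1 ih =>
    intro f2 s res h0 hlt hlen h1 h2
    rcases f2 with _ | f2
    · omega
    simp only [checkInnerA]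
    cases ht : PySem.List.pyGet? T res with
    | none => rfl
    | some t =>
      by_cases hc : s + t ≤ P
      · simp only [if_pos hc]
        by_cases he : res + 1 = n
        · simp [he]
        · simp only [if_neg he]
          exact ih f2 (s + t) (res + 1) (by omega) (by omega) hlen (by omega) (by omega)
      · simp [hc]

-- the main simulation lemma: A mid-truck state (load s, index res, j trucks remaining after
-- the current one) equals B's single-pass state (load s, used = k - j, index res)
lemma main_sim (P k n : Int) (T : List Int) :
    ∀ (c : Nat) (F : Nat) (s res : Int) (j : Nat), c ≤ F → 0 ≤ res → (res : Int) + c = n →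
      n ≤ T.length → 0 < c →
      (let pr := checkInnerA P n T F s res;
       if pr.2 then pr.1 else checkOuterA P n T j pr.1)
      = checkGoB P k n T c s (k - j) res := by
  intro c
  induction c with
  | zero => intro F s res j hF h0 hres hlen hc; omega
  | succ c ih =>
    intro F s res j hF h0 hres hlen hc
    have hlt : res < n := by omega
    rcases F with _ | F
    · omega
    obtain ⟨t, ht⟩ : ∃ t, PySem.List.pyGet? T res = some t :=
      ⟨T[res.toNat], PySem.List.pyGet?_eq_some_getElem T h0 (by omega)⟩
    simp only [checkInnerA, checkGoB, ht]
    by_cases hcmp : s + t ≤ P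
    · simp only [if_pos hcmp]
      by_cases he : res + 1 = n
      · -- early return n on both sides
        have hc0 : c = 0 := by omega
        subst hc0
        simp [he, checkGoB]
      · simp only [if_neg he]
        have hgo := ih F (s + t) (res + 1) j (by omega) (by omega) (by omega) hlen (by omega)
        simpa using hgo
    · simp only [if_neg hcmp]
      -- current truck closes at res
      rcases j with _ | j
      · -- no trucks left: A returns res, B's used+1 > k
        simp [checkOuterA]
      · have hjk : ¬ (k - (↑(j + 1) : Int) + 1 > k) := by push_cast; omega
        simp only [if_neg hjk]
        by_cases htP : t > P
        · -- item alone exceeds P: all remaining trucks burn, A returns res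
          simp only [if_pos htP]
          exact outer_burn P n T res t ht (by omega) (j + 1)
        · -- item fits a fresh truck
          simp only [if_neg htP]
          have hused : k - (↑(j + 1) : Int) + 1 = k - (j : Int) := by push_cast; omega
          -- unfold one step of A's next truck
          simp only [checkOuterA]
          have hfuel : checkInnerA P n T (T.length + 1) 0 res
              = checkInnerA P n T (F + 1) 0 res := by
            exact inner_fuel P n T (T.length + 1) (F + 1) 0 res h0 hlt hlen (by omega) (by omega)
          rw [hfuel]
          simp only [checkInnerA, ht, if_pos (show (0 : Int) + t ≤ P by omega)]
          by_cases he : res + 1 = n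
          · have hc0 : c = 0 := by omega
            subst hc0
            simp [he, checkGoB]
          · simp only [if_neg he]
            have hgo := ih F t (res + 1) j (by omega) (by omega) (by omega) hlen (by omega)
            rw [← hused] at hgo
            simpa using hgo

-- ===== VERDICT (by name: the statement is the Claim_ definition above) =====
theorem check_spec : Claim_equal_check := by
  intro P k n T _hdom hpre
  unfold Spec_check check check_alt
  by_cases hk : k ≤ 0
  · have : k.toNat = 0 := by omega
    simp [this, checkOuterA, hk]
  · rcases hpre with h | ⟨hn1, hnlen⟩
    · omega
    have hkn : k.toNat = (k.toNat - 1) + 1 := by omega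
    simp only [if_neg hk]
    rw [hkn]
    simp only [checkOuterA]
    have := main_sim P k n T n.toNat (T.length + 1) 0 0 (k.toNat - 1) (by omega) (le_refl 0)
      (by omega) (by exact_mod_cast hnlen) (by omega)
    have hused : k - (↑(k.toNat - 1) : Int) = 1 := by omega
    rw [hused] at this
    simpa using this
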